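-- pv_equiv track=rewrite | github.com/daniel-reich/turbo-robot | vfuZia9ufckGzhGZh_24.py | seq_level
-- ===== SOURCE A (Python) =====
-- def seq_level(lst):
--   L=[lst[i+1]-lst[i] for i in range(len(lst)-1)]
--   if all(x==lst[1]-lst[0] and lst[1]-lst[0] for x in L):
--     return  "Linear"
--   elif seq_level(L)== "Linear":
--     return "Quadratic"
--   else:
--     return "Cubic"
-- ===== SOURCE B (Python) =====
-- def seq_level(lst):
--     # Non-recursive: only the first two difference levels decide the answer.
--     d1 = [b - a for a, b in zip(lst, lst[1:])]
--
--     def const_nonzero(d):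
--         return bool(d) and d[0] != 0 and all(x == d[0] for x in d)
--
--     if not d1 or const_nonzero(d1):
--         return "Linear"
--     d2 = [b - a for a, b in zip(d1, d1[1:])]
--     if not d2 or const_nonzero(d2):
--         return "Quadratic"
--     return "Cubic"
-- ===== Notes on version B (the rewrite author's own statement) =====
-- stated objective: faster
-- what changed: Replaced A's recursion (which rebuilds a full difference list per level, up to n levels deep) by a non-recursive two-level check: compute only the first and second difference lists once and test each for empty-or-constant-nonzero.
import Mathlib
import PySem

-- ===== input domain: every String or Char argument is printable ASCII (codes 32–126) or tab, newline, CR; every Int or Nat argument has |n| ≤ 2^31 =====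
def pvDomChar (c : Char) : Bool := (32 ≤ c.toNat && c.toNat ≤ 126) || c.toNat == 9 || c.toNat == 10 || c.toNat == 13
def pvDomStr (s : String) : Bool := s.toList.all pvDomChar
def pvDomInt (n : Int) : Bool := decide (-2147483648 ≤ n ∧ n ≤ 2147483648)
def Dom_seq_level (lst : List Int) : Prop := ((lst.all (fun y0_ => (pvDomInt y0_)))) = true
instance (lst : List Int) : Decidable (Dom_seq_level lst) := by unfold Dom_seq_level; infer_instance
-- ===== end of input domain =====

-- B replaces A's per-level recursion by a single pass over the first two difference lists (faster: O(n) vs O(n^2)).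

-- ===== PORT A =====
-- [lst[i+1]-lst[i] for i in range(len(lst)-1)] ; the indices i, i+1 are always in range, so pyGetD … 0 is exact here
def pyDiffs (lst : List Int) : List Int :=
  (PySem.List.pyRange 0 ((lst.length : Int) - 1) 1).map
    (fun i => PySem.List.pyGetD lst (i + 1) 0 - PySem.List.pyGetD lst i 0)

-- termination helper for the port: the recursive call is on a strictly shorter list
theorem pyDiffs_length_lt (lst : List Int) (h : pyDiffs lst ≠ []) :
    (pyDiffs lst).length < lst.length := by
  have hl : (pyDiffs lst).length = ((lst.length : Int) - 1 - 0).toNat := by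
    unfold pyDiffs
    rw [List.length_map, PySem.List.length_pyRange_one]
  have h0 : (pyDiffs lst).length ≠ 0 := by simpa [List.length_eq_zero_iff] using h
  omega

-- `x==lst[1]-lst[0] and lst[1]-lst[0]` is truthy iff x equals the first difference and it is nonzero
def seq_level (lst : List Int) : String :=
  if (pyDiffs lst).all (fun x =>
        x == (PySem.List.pyGetD lst 1 0 - PySem.List.pyGetD lst 0 0) &&
        !((PySem.List.pyGetD lst 1 0 - PySem.List.pyGetD lst 0 0) == 0)) then
    "Linear"
  else if seq_level (pyDiffs lst) == "Linear" then "Quadratic"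
  else "Cubic"
termination_by lst.length
decreasing_by
  exact pyDiffs_length_lt lst (by intro he; simp [he] at *)

-- ===== PORT B =====
-- [b - a for a, b in zip(lst, lst[1:])]
def zdiffs (xs : List Int) : List Int := (xs.zip xs.tail).map (fun p => p.2 - p.1)

-- bool(d) and d[0] != 0 and all(x == d[0] for x in d)
def constNonzero (d : List Int) : Bool :=
  !d.isEmpty && !(d.headD 0 == 0) && d.all (fun x => x == d.headD 0)

def seq_level_alt (lst : List Int) : String :=
  let d1 := zdiffs lst
  if d1.isEmpty || constNonzero d1 then "Linear"
  else
    let d2 := zdiffs d1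
    if d2.isEmpty || constNonzero d2 then "Quadratic"
    else "Cubic"

-- ===== PRECONDITION & SPEC =====
def Spec_seq_level (lst : List Int) (out : String) : Prop := out = seq_level_alt lst
instance (lst : List Int) (out : String) : Decidable (Spec_seq_level lst out) := by unfold Spec_seq_level; infer_instance

-- ===== CLAIM (what is proved, stated in full; the proofs are below) =====
def Claim_equal_seq_level : Prop := ∀ (lst : List Int), Dom_seq_level lst → Spec_seq_level lst (seq_level lst)

-- ===== LEMMAS AND PROOFS =====

theorem idxDiffs_eq (xs : List Int) :
    (List.range (xs.length - 1)).map (fun k => xs.getD (k + 1) 0 - xs.getD k 0) = zdiffs xs := by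
  match xs with
  | [] => simp [zdiffs]
  | [a] => simp [zdiffs]
  | a :: b :: t =>
    have ih := idxDiffs_eq (b :: t)
    simp only [zdiffs, List.tail_cons, List.zip_cons_cons, List.map_cons,
      List.length_cons, Nat.add_sub_cancel] at ih ⊢
    rw [List.range_succ_eq_map, List.map_cons, List.map_map]
    refine congrArg₂ _ (by simp) ?_
    rw [← ih]
    apply List.map_congr_left
    intro k _
    simp

theorem pyDiffs_eq (xs : List Int) : pyDiffs xs = zdiffs xs := by
  unfold pyDiffs
  rw [PySem.List.pyRange_one, List.map_map, ← idxDiffs_eq xs]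
  have hn : ((xs.length : Int) - 1 - 0).toNat = xs.length - 1 := by omega
  rw [hn]
  refine List.map_congr_left (fun k hk => ?_)
  simp [PySem.List.pyGetD_natCast, Function.comp, List.getD_eq_getElem?_getD]
  rw [show ((k : Int) + 1) = ((k + 1 : Nat) : Int) by push_cast; ring,
      PySem.List.pyGetD_natCast]
  simp [List.getD_eq_getElem?_getD]

theorem cond_eq (xs : List Int) :
    ((zdiffs xs).all (fun x =>
        x == (PySem.List.pyGetD xs 1 0 - PySem.List.pyGetD xs 0 0) &&
        !((PySem.List.pyGetD xs 1 0 - PySem.List.pyGetD xs 0 0) == 0)))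
      = ((zdiffs xs).isEmpty || constNonzero (zdiffs xs)) := by
  match xs with
  | [] => rfl
  | [a] => rfl
  | a :: b :: t =>
    have hz : zdiffs (a :: b :: t) = (b - a) :: zdiffs (b :: t) := rfl
    have hg : PySem.List.pyGetD (a :: b :: t) 1 0 - PySem.List.pyGetD (a :: b :: t) 0 0 = b - a := by
      simp [PySem.List.pyGetD, PySem.List.pyGet?, PySem.List.pyIdx?]
      rw [if_pos (by positivity)]
      simp
    rw [hz, hg, Bool.eq_iff_iff]
    by_cases hne : b - a = 0 <;>
      simp [constNonzero, List.all_eq_true, hne]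

theorem seq_level_linear_iff (xs : List Int) :
    (seq_level xs = "Linear") ↔
      (((zdiffs xs).isEmpty || constNonzero (zdiffs xs)) = true) := by
  rw [seq_level, pyDiffs_eq, cond_eq]
  split_ifs with h h2
  · simp [h]
  all_goals exact ⟨fun hc => absurd hc (by decide), fun hc => absurd hc h⟩

theorem seq_level_eq_alt (lst : List Int) : seq_level lst = seq_level_alt lst := by
  rw [seq_level, pyDiffs_eq, cond_eq]
  simp only [seq_level_alt]
  by_cases h1 : ((zdiffs lst).isEmpty || constNonzero (zdiffs lst)) = true
  · rw [if_pos h1, if_pos h1]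
  · rw [if_neg h1, if_neg h1]
    have hbeq : (seq_level (zdiffs lst) == "Linear")
        = ((zdiffs (zdiffs lst)).isEmpty || constNonzero (zdiffs (zdiffs lst))) := by
      rw [Bool.eq_iff_iff, beq_iff_eq, seq_level_linear_iff]
    rw [hbeq]

-- ===== VERDICT (by name: the statement is the Claim_ definition above) =====
theorem seq_level_spec : Claim_equal_seq_level := by
  intro lst _
  unfold Spec_seq_level
  exact seq_level_eq_alt lst
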